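-- pv_equiv track=rewrite | github.com/GregVernon/cubit-higher-order-mesh | initial.py | getUniformNodeIDs
-- ===== SOURCE A (Python) =====
-- def getUniformNodeIDs( degree ):
--   nodes = {}
--   n = -1
--   for k in range( 0, degree[2] + 1 ):
--     for j in range( 0, degree[1] + 1 ):
--       for i in range( 0, degree[0] + 1 ):
--         n += 1
--         nodes[( i, j, k )] = n
--   return nodes
-- ===== SOURCE B (Python) =====
-- def getUniformNodeIDs( degree ):
--   p = degree[0] + 1
--   q = degree[1] + 1
--   r = degree[2] + 1
--   if p <= 0 or q <= 0 or r <= 0: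
--     return {}
--   nodes = {}
--   for n in range( p * q * r ):
--     k, m = divmod( n, p * q )
--     j, i = divmod( m, p )
--     nodes[( i, j, k )] = n
--   return nodes
-- ===== Notes on version B (the rewrite author's own statement) =====
-- stated objective: alternative
-- what changed: Inverts the mapping: instead of three nested loops threading a counter over (k,j,i), B runs one flat loop over the sequential IDs n in range(p*q*r) and recovers each node's (i,j,k) from n by two divmods (guarding the degenerate empty lattice).
import Mathlib
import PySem

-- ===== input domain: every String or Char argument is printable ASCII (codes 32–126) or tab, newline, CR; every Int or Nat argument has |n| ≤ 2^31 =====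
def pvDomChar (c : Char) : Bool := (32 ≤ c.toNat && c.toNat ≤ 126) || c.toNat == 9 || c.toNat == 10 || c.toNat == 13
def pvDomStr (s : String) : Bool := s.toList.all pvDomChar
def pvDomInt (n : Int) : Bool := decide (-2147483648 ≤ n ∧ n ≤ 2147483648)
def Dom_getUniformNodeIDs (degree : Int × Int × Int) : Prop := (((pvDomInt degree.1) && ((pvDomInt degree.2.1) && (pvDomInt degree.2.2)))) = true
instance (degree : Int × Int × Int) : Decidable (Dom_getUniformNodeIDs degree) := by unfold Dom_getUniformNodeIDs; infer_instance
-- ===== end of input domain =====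

-- B inverts A's iteration: one flat loop over the sequential IDs n, recovering each node's
-- (i,j,k) from n by two divmods, instead of three nested loops threading a counter (objective: alternative).

-- ===== PORT A =====
-- the innermost 'for i' loop of A (threads the (dict, counter) state)
def pvALoopI (p j k : Int) (st : PySem.Dict (Int × Int × Int) Int × Int) :
    PySem.Dict (Int × Int × Int) Int × Int :=
  (PySem.List.pyRange 0 p 1).foldl (fun st i => (st.1.insert (i, j, k) (st.2 + 1), st.2 + 1)) st

-- the middle 'for j' loop of A
def pvALoopJ (p q k : Int) (st : PySem.Dict (Int × Int × Int) Int × Int) :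
    PySem.Dict (Int × Int × Int) Int × Int :=
  (PySem.List.pyRange 0 q 1).foldl (fun st j => pvALoopI p j k st) st

-- the outer 'for k' loop of A
def pvALoopK (p q r : Int) (st : PySem.Dict (Int × Int × Int) Int × Int) :
    PySem.Dict (Int × Int × Int) Int × Int :=
  (PySem.List.pyRange 0 r 1).foldl (fun st k => pvALoopJ p q k st) st

-- A: nodes = {}; n = -1; triple loop inserting (i,j,k) ↦ n; the returned dict's items,
-- flattened ((i,j,k),n) ↦ (i,j,k,n) to meet the required output type
def getUniformNodeIDs (degree : Int × Int × Int) : List (Int × Int × Int × Int) :=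
  ((pvALoopK (degree.1 + 1) (degree.2.1 + 1) (degree.2.2 + 1)
      (PySem.Dict.empty, -1)).1.items).map (fun pr => (pr.1.1, pr.1.2.1, pr.1.2.2, pr.2))

-- ===== PORT B =====
-- B: if any extent is nonpositive return {}; else one loop over n in range(p*q*r),
-- with divmod(n, p*q) ported as the pair (floordiv, mod) — exact, since p*q ≠ 0 in this branch
def getUniformNodeIDs_alt (degree : Int × Int × Int) : List (Int × Int × Int × Int) :=
  let p := degree.1 + 1
  let q := degree.2.1 + 1
  let r := degree.2.2 + 1
  if p ≤ 0 ∨ q ≤ 0 ∨ r ≤ 0 then []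
  else
    ((PySem.List.pyRange 0 (p * q * r) 1).foldl (fun d n =>
        let k := PySem.Int.floordiv n (p * q)
        let m := PySem.Int.mod n (p * q)
        let j := PySem.Int.floordiv m p
        let i := PySem.Int.mod m p
        d.insert (i, j, k) n) PySem.Dict.empty).items.map
      (fun pr => (pr.1.1, pr.1.2.1, pr.1.2.2, pr.2))

-- ===== PRECONDITION & SPEC =====
def Spec_getUniformNodeIDs (degree : Int × Int × Int) (out : List (Int × Int × Int × Int)) : Prop := out = getUniformNodeIDs_alt degree
instance (degree : Int × Int × Int) (out : List (Int × Int × Int × Int)) : Decidable (Spec_getUniformNodeIDs degree out) := by unfold Spec_getUniformNodeIDs; infer_instance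

-- ===== CLAIM (what is proved, stated in full; the proofs are below) =====
def Claim_equal_getUniformNodeIDs : Prop := ∀ (degree : Int × Int × Int), Dom_getUniformNodeIDs degree → Spec_getUniformNodeIDs degree (getUniformNodeIDs degree)

-- ===== LEMMAS AND PROOFS =====

-- ---------- A-side: characterise the triple loop ----------

theorem pvALoopI_nat (m : Nat) (j k n : Int) (d : PySem.Dict (Int × Int × Int) Int)
    (h : ∀ i : Int, d.contains (i, j, k) = false) :
    pvALoopI (m : Int) j k (d, n) =
      (PySem.Dict.mk (d.items ++ (PySem.List.pyRange 0 (m : Int) 1).map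
        (fun i => ((i, j, k), n + 1 + i))), n + (m : Int)) := by
  induction m with
  | zero => simp [pvALoopI, PySem.List.pyRange_one_eq_nil le_rfl]
  | succ m ih =>
    have hcast : ((m + 1 : Nat) : Int) = (m : Int) + 1 := by push_cast; ring
    have hfresh : (PySem.Dict.mk (d.items ++ (PySem.List.pyRange 0 (m : Int) 1).map
        (fun i => ((i, j, k), n + 1 + i)))).contains ((m : Int), j, k) = false := by
      simp only [PySem.Dict.contains, List.any_append, List.any_map, Bool.or_eq_false_iff]
      refine ⟨h (m : Int), ?_⟩
      rw [List.any_eq_false]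
      intro i hi
      rw [PySem.List.mem_pyRange_one] at hi
      simp only [Function.comp, beq_iff_eq]
      simp only [Prod.mk.injEq, not_and]
      intro hx; omega
    simp only [pvALoopI] at ih ⊢
    rw [hcast, PySem.List.pyRange_one_succ_right (Int.natCast_nonneg m), List.foldl_append, ih]
    simp only [List.foldl_cons, List.foldl_nil]
    rw [Prod.mk.injEq]
    constructor
    · apply PySem.Dict.ext
      rw [PySem.Dict.items_insert_of_not_contains _ _ hfresh]
      simp only [List.map_append, List.map_cons, List.map_nil, List.append_assoc,
        List.append_cancel_left_eq]
      norm_num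
      ring
    · ring

theorem pvALoopI_int (p j k n : Int) (d : PySem.Dict (Int × Int × Int) Int)
    (h : ∀ i : Int, d.contains (i, j, k) = false) :
    pvALoopI p j k (d, n) =
      (PySem.Dict.mk (d.items ++ (PySem.List.pyRange 0 p 1).map
        (fun i => ((i, j, k), n + 1 + i))), n + max p 0) := by
  rcases le_or_gt p 0 with hp | hp
  · have : max p 0 = 0 := by omega
    simp [pvALoopI, PySem.List.pyRange_one_eq_nil hp, this]
  · have hp' : p = ((p.toNat : Nat) : Int) := by omega
    rw [hp', pvALoopI_nat _ _ _ _ _ h]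
    have : max ((p.toNat : Nat) : Int) 0 = ((p.toNat : Nat) : Int) := by omega
    rw [this]

theorem pvALoopJ_nat (p : Int) (m : Nat) (k n : Int) (d : PySem.Dict (Int × Int × Int) Int)
    (h : ∀ i j : Int, d.contains (i, j, k) = false) :
    pvALoopJ p (m : Int) k (d, n) =
      (PySem.Dict.mk (d.items ++ (PySem.List.pyRange 0 (m : Int) 1).flatMap (fun j =>
        (PySem.List.pyRange 0 p 1).map (fun i => ((i, j, k), n + p * j + 1 + i)))),
       n + max p 0 * (m : Int)) := by
  induction m with
  | zero => simp [pvALoopJ, PySem.List.pyRange_one_eq_nil le_rfl]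
  | succ m ih =>
    have hcast : ((m + 1 : Nat) : Int) = (m : Int) + 1 := by push_cast; ring
    have hfresh : ∀ i : Int, (PySem.Dict.mk (d.items ++
        (PySem.List.pyRange 0 (m : Int) 1).flatMap (fun j =>
          (PySem.List.pyRange 0 p 1).map (fun i => ((i, j, k), n + p * j + 1 + i))))).contains
        (i, (m : Int), k) = false := by
      intro i
      simp only [PySem.Dict.contains]
      rw [List.any_eq_false]
      intro pr hpr
      rcases List.mem_append.1 hpr with hd | hnew
      · have hi := h i (m : Int)
        simp only [PySem.Dict.contains] at hi
        rw [List.any_eq_false] at hi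
        exact hi pr hd
      · obtain ⟨j', hj', hpr'⟩ := List.mem_flatMap.1 hnew
        obtain ⟨i', _, rfl⟩ := List.mem_map.1 hpr'
        rw [PySem.List.mem_pyRange_one] at hj'
        simp only [beq_iff_eq, Prod.mk.injEq, not_and]
        intro _ hj; omega
    simp only [pvALoopJ] at ih ⊢
    rw [hcast, PySem.List.pyRange_one_succ_right (Int.natCast_nonneg m), List.foldl_append, ih]
    simp only [List.foldl_cons, List.foldl_nil]
    rw [pvALoopI_int _ _ _ _ _ hfresh]
    rw [Prod.mk.injEq]
    constructor
    · apply PySem.Dict.ext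
      have hseg : (PySem.List.pyRange 0 p 1).map
            (fun i => ((i, (m : Int), k), n + max p 0 * (m : Int) + 1 + i)) =
          (PySem.List.pyRange 0 p 1).map
            (fun i => ((i, (m : Int), k), n + p * (m : Int) + 1 + i)) := by
        apply List.map_congr_left
        intro i hi
        rw [PySem.List.mem_pyRange_one] at hi
        have : max p 0 = p := by omega
        rw [this]
      rw [List.flatMap_append]
      simp only [List.flatMap_cons, List.flatMap_nil, List.append_nil, List.append_assoc]
      rw [hseg]
    · ring

theorem pvALoopJ_int (p q k n : Int) (d : PySem.Dict (Int × Int × Int) Int)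
    (h : ∀ i j : Int, d.contains (i, j, k) = false) :
    pvALoopJ p q k (d, n) =
      (PySem.Dict.mk (d.items ++ (PySem.List.pyRange 0 q 1).flatMap (fun j =>
        (PySem.List.pyRange 0 p 1).map (fun i => ((i, j, k), n + p * j + 1 + i)))),
       n + max p 0 * max q 0) := by
  rcases le_or_gt q 0 with hq | hq
  · have : max q 0 = 0 := by omega
    simp [pvALoopJ, PySem.List.pyRange_one_eq_nil hq, this]
  · have hq' : q = ((q.toNat : Nat) : Int) := by omega
    rw [hq', pvALoopJ_nat _ _ _ _ _ h]
    have : max ((q.toNat : Nat) : Int) 0 = ((q.toNat : Nat) : Int) := by omega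
    rw [this]

theorem pvALoopK_nat (p q : Int) (m : Nat) (n : Int) (d : PySem.Dict (Int × Int × Int) Int)
    (h : ∀ key : Int × Int × Int, d.contains key = false) :
    pvALoopK p q (m : Int) (d, n) =
      (PySem.Dict.mk (d.items ++ (PySem.List.pyRange 0 (m : Int) 1).flatMap (fun k =>
        (PySem.List.pyRange 0 q 1).flatMap (fun j =>
          (PySem.List.pyRange 0 p 1).map (fun i => ((i, j, k), n + p * q * k + p * j + 1 + i))))),
       n + max p 0 * max q 0 * (m : Int)) := by
  induction m with
  | zero => simp [pvALoopK, PySem.List.pyRange_one_eq_nil le_rfl]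
  | succ m ih =>
    have hcast : ((m + 1 : Nat) : Int) = (m : Int) + 1 := by push_cast; ring
    have hfresh : ∀ i j : Int, (PySem.Dict.mk (d.items ++
        (PySem.List.pyRange 0 (m : Int) 1).flatMap (fun k =>
          (PySem.List.pyRange 0 q 1).flatMap (fun j =>
            (PySem.List.pyRange 0 p 1).map
              (fun i => ((i, j, k), n + p * q * k + p * j + 1 + i)))))).contains
        (i, j, (m : Int)) = false := by
      intro i j
      simp only [PySem.Dict.contains]
      rw [List.any_eq_false]
      intro pr hpr
      rcases List.mem_append.1 hpr with hd | hnew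
      · have hi := h (i, j, (m : Int))
        simp only [PySem.Dict.contains] at hi
        rw [List.any_eq_false] at hi
        exact hi pr hd
      · obtain ⟨k', hk', hpr'⟩ := List.mem_flatMap.1 hnew
        obtain ⟨j', _, hpr''⟩ := List.mem_flatMap.1 hpr'
        obtain ⟨i', _, rfl⟩ := List.mem_map.1 hpr''
        rw [PySem.List.mem_pyRange_one] at hk'
        simp only [beq_iff_eq, Prod.mk.injEq, not_and]
        intro _ _ hk; omega
    simp only [pvALoopK] at ih ⊢
    rw [hcast, PySem.List.pyRange_one_succ_right (Int.natCast_nonneg m), List.foldl_append, ih]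
    simp only [List.foldl_cons, List.foldl_nil]
    rw [pvALoopJ_int _ _ _ _ _ hfresh]
    rw [Prod.mk.injEq]
    constructor
    · apply PySem.Dict.ext
      have hseg : (PySem.List.pyRange 0 q 1).flatMap (fun j => (PySem.List.pyRange 0 p 1).map
            (fun i => ((i, j, (m : Int)), n + max p 0 * max q 0 * (m : Int) + p * j + 1 + i))) =
          (PySem.List.pyRange 0 q 1).flatMap (fun j => (PySem.List.pyRange 0 p 1).map
            (fun i => ((i, j, (m : Int)), n + p * q * (m : Int) + p * j + 1 + i))) := by
        apply List.flatMap_congr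
        intro j hj
        rw [PySem.List.mem_pyRange_one] at hj
        apply List.map_congr_left
        intro i hi
        rw [PySem.List.mem_pyRange_one] at hi
        have h1 : max p 0 = p := by omega
        have h2 : max q 0 = q := by omega
        rw [h1, h2]
      rw [List.flatMap_append]
      simp only [List.flatMap_cons, List.flatMap_nil, List.append_nil, List.append_assoc]
      rw [hseg]
    · ring

theorem pvALoopK_int (p q r n : Int) (d : PySem.Dict (Int × Int × Int) Int)
    (h : ∀ key : Int × Int × Int, d.contains key = false) :
    pvALoopK p q r (d, n) =
      (PySem.Dict.mk (d.items ++ (PySem.List.pyRange 0 r 1).flatMap (fun k =>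
        (PySem.List.pyRange 0 q 1).flatMap (fun j =>
          (PySem.List.pyRange 0 p 1).map (fun i => ((i, j, k), n + p * q * k + p * j + 1 + i))))),
       n + max p 0 * max q 0 * max r 0) := by
  rcases le_or_gt r 0 with hr | hr
  · have : max r 0 = 0 := by omega
    simp [pvALoopK, PySem.List.pyRange_one_eq_nil hr, this]
  · have hr' : r = ((r.toNat : Nat) : Int) := by omega
    rw [hr', pvALoopK_nat _ _ _ _ _ h]
    have : max ((r.toNat : Nat) : Int) 0 = ((r.toNat : Nat) : Int) := by omega
    rw [this]

-- ---------- B-side: characterise the flat loop ----------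

-- folding insert over distinct fresh keys is an append of the key/value pairs
theorem pvFoldlInsert (f : Int → (Int × Int × Int)) (ns : List Int)
    (d : PySem.Dict (Int × Int × Int) Int)
    (hfresh : ∀ n ∈ ns, d.contains (f n) = false)
    (hinj : ns.Pairwise (fun a b => f a ≠ f b)) :
    ns.foldl (fun d n => d.insert (f n) n) d =
      PySem.Dict.mk (d.items ++ ns.map (fun n => (f n, n))) := by
  induction ns generalizing d with
  | nil => simpa using (PySem.Dict.ext_iff.2 rfl : d = PySem.Dict.mk d.items)
  | cons n ns ih =>
    have hnd : d.contains (f n) = false := hfresh n (List.mem_cons_self)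
    have hitems : (d.insert (f n) n).items = d.items ++ [(f n, n)] :=
      PySem.Dict.items_insert_of_not_contains _ _ hnd
    have hfresh' : ∀ x ∈ ns, (d.insert (f n) n).contains (f x) = false := by
      intro x hx
      simp only [PySem.Dict.contains, hitems, List.any_append, Bool.or_eq_false_iff]
      constructor
      · have := hfresh x (List.mem_cons_of_mem _ hx)
        simpa [PySem.Dict.contains] using this
      · simp only [List.any_cons, List.any_nil, Bool.or_false]
        exact beq_eq_false_iff_ne.2 (fun h => (List.pairwise_cons.1 hinj).1 x hx h)
    rw [List.foldl_cons, ih _ hfresh' (List.pairwise_cons.1 hinj).2, hitems]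
    simp only [List.map_cons, List.append_assoc, List.singleton_append]

-- range(0, a*b) split into b consecutive blocks of length a
theorem pvRangeMulNat {α : Type} (a : Int) (ha : 0 ≤ a) (m : Nat) (F : Int → α) :
    (PySem.List.pyRange 0 (a * (m : Int)) 1).map F =
      (PySem.List.pyRange 0 (m : Int) 1).flatMap (fun k =>
        (PySem.List.pyRange 0 a 1).map (fun x => F (a * k + x))) := by
  induction m with
  | zero => simp [PySem.List.pyRange_one_eq_nil le_rfl]
  | succ m ih =>
    have hcast : ((m + 1 : Nat) : Int) = (m : Int) + 1 := by push_cast; ring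
    have h1 : (0 : Int) ≤ a * (m : Int) := by positivity
    have h2 : a * (m : Int) ≤ a * ((m : Int) + 1) := by nlinarith
    rw [hcast, mul_add, mul_one,
      PySem.List.pyRange_one_append 0 (a * (m : Int)) (a * (m : Int) + a) h1 (by omega),
      PySem.List.pyRange_one_succ_right (Int.natCast_nonneg m), List.map_append,
      List.flatMap_append, ih]
    simp only [List.flatMap_cons, List.flatMap_nil, List.append_nil]
    congr 1
    rw [PySem.List.pyRange_one, PySem.List.pyRange_one]
    simp only [List.map_map, sub_zero, add_sub_cancel_left]
    apply List.map_congr_left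
    intro x _
    simp [Function.comp]

theorem pvRangeMulInt {α : Type} (a b : Int) (ha : 0 ≤ a) (hb : 0 ≤ b) (F : Int → α) :
    (PySem.List.pyRange 0 (a * b) 1).map F =
      (PySem.List.pyRange 0 b 1).flatMap (fun k =>
        (PySem.List.pyRange 0 a 1).map (fun x => F (a * k + x))) := by
  have hb' : b = ((b.toNat : Nat) : Int) := by omega
  rw [hb']
  exact pvRangeMulNat a ha _ F

-- the divmod decomposition n ↦ (n mod pq mod p, n mod pq div p, n div pq) is injective
theorem pvDivmodInj (p q a b : Int)
    (h1 : PySem.Int.mod (PySem.Int.mod a (p * q)) p = PySem.Int.mod (PySem.Int.mod b (p * q)) p)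
    (h2 : PySem.Int.floordiv (PySem.Int.mod a (p * q)) p
        = PySem.Int.floordiv (PySem.Int.mod b (p * q)) p)
    (h3 : PySem.Int.floordiv a (p * q) = PySem.Int.floordiv b (p * q)) : a = b := by
  have ea := PySem.Int.floordiv_mul_add_mod a (p * q)
  have eb := PySem.Int.floordiv_mul_add_mod b (p * q)
  have ea' := PySem.Int.floordiv_mul_add_mod (PySem.Int.mod a (p * q)) p
  have eb' := PySem.Int.floordiv_mul_add_mod (PySem.Int.mod b (p * q)) p
  calc a = PySem.Int.floordiv a (p * q) * (p * q) + PySem.Int.mod a (p * q) := ea.symm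
    _ = PySem.Int.floordiv a (p * q) * (p * q)
        + (PySem.Int.floordiv (PySem.Int.mod a (p * q)) p * p
           + PySem.Int.mod (PySem.Int.mod a (p * q)) p) := by rw [ea']
    _ = PySem.Int.floordiv b (p * q) * (p * q)
        + (PySem.Int.floordiv (PySem.Int.mod b (p * q)) p * p
           + PySem.Int.mod (PySem.Int.mod b (p * q)) p) := by rw [h1, h2, h3]
    _ = PySem.Int.floordiv b (p * q) * (p * q) + PySem.Int.mod b (p * q) := by rw [eb']
    _ = b := eb

-- divmod arithmetic at n = p*q*k + p*j + i with 0 ≤ i < p, 0 ≤ j < q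
theorem pvDivmodEval (p q k j i : Int) (hp : 0 < p) (hq : 0 < q)
    (hi : 0 ≤ i ∧ i < p) (hj : 0 ≤ j ∧ j < q) :
    PySem.Int.floordiv (p * q * k + (p * j + i)) (p * q) = k ∧
    PySem.Int.mod (p * q * k + (p * j + i)) (p * q) = p * j + i ∧
    PySem.Int.floordiv (p * j + i) p = j ∧
    PySem.Int.mod (p * j + i) p = i := by
  have hpq : 0 < p * q := by positivity
  have hbound : 0 ≤ p * j + i ∧ p * j + i < p * q := by
    constructor
    · nlinarith [hi.1, hj.1]
    · nlinarith [hi.2, hj.2]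
  have hk : PySem.Int.floordiv (p * q * k + (p * j + i)) (p * q) = k := by
    rw [PySem.Int.floordiv_eq_iff_of_pos hpq]
    constructor <;> nlinarith [hbound.1, hbound.2]
  have hm : PySem.Int.mod (p * q * k + (p * j + i)) (p * q) = p * j + i := by
    have := PySem.Int.floordiv_mul_add_mod (p * q * k + (p * j + i)) (p * q)
    rw [hk] at this; linarith
  have hj' : PySem.Int.floordiv (p * j + i) p = j := by
    rw [PySem.Int.floordiv_eq_iff_of_pos hp]
    constructor <;> nlinarith [hi.1, hi.2]
  have hi' : PySem.Int.mod (p * j + i) p = i := by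
    have := PySem.Int.floordiv_mul_add_mod (p * j + i) p
    rw [hj'] at this; linarith
  exact ⟨hk, hm, hj', hi'⟩

-- ===== VERDICT (by name: the statement is the Claim_ definition above) =====
theorem getUniformNodeIDs_spec : Claim_equal_getUniformNodeIDs := by
  intro degree _
  unfold Spec_getUniformNodeIDs getUniformNodeIDs getUniformNodeIDs_alt
  set p := degree.1 + 1 with hp
  set q := degree.2.1 + 1 with hq
  set r := degree.2.2 + 1 with hr
  rw [pvALoopK_int _ _ _ _ _ (fun key => rfl)]
  simp only [PySem.Dict.empty, List.nil_append, List.map_flatMap, List.map_map]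
  by_cases hdeg : p ≤ 0 ∨ q ≤ 0 ∨ r ≤ 0
  · rw [if_pos hdeg]
    rcases hdeg with h | h | h
    · refine List.flatMap_eq_nil_iff.2 ?_
      intro k _
      refine List.flatMap_eq_nil_iff.2 ?_
      intro j _
      simp [PySem.List.pyRange_one_eq_nil h]
    · refine List.flatMap_eq_nil_iff.2 ?_
      intro k _
      simp [PySem.List.pyRange_one_eq_nil h]
    · simp [PySem.List.pyRange_one_eq_nil h]
  · rw [if_neg hdeg]
    push_neg at hdeg
    obtain ⟨hp0, hq0, hr0⟩ := hdeg
    -- B: evaluate the fold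
    have hinj : (PySem.List.pyRange 0 (p * q * r) 1).Pairwise
        (fun a b => (PySem.Int.mod (PySem.Int.mod a (p * q)) p,
            PySem.Int.floordiv (PySem.Int.mod a (p * q)) p,
            PySem.Int.floordiv a (p * q)) ≠
          (PySem.Int.mod (PySem.Int.mod b (p * q)) p,
            PySem.Int.floordiv (PySem.Int.mod b (p * q)) p,
            PySem.Int.floordiv b (p * q))) := by
      refine (PySem.List.pairwise_lt_pyRange_one 0 (p * q * r)).imp ?_
      intro a b hab heq
      simp only [Prod.mk.injEq] at heq
      exact absurd (pvDivmodInj p q a b heq.1 heq.2.1 heq.2.2) (ne_of_lt hab)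
    rw [pvFoldlInsert (fun n => (PySem.Int.mod (PySem.Int.mod n (p * q)) p,
          PySem.Int.floordiv (PySem.Int.mod n (p * q)) p,
          PySem.Int.floordiv n (p * q))) _ _ (fun n _ => rfl) hinj]
    simp only [List.nil_append, List.map_map]
    -- split range(p*q*r) into layers, then rows
    rw [show p * q * r = (p * q) * r by ring,
      pvRangeMulInt (p * q) r (by positivity) (by omega)]
    refine (List.flatMap_congr ?_).symm
    intro k hk
    rw [pvRangeMulInt p q (by omega) (by omega)]
    refine List.flatMap_congr ?_
    intro j hj
    refine List.map_congr_left ?_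
    intro i hi
    rw [PySem.List.mem_pyRange_one] at hi hj
    obtain ⟨hk', hm', hj', hi'⟩ :=
      pvDivmodEval p q k j i (by omega) (by omega) ⟨hi.1, hi.2⟩ ⟨hj.1, hj.2⟩
    simp only [Function.comp, hm', hk', hj', hi', Prod.mk.injEq]
    exact ⟨trivial, trivial, trivial, by ring⟩
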